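-- pv_equiv track=rewrite | github.com/yihanpan1999/QueueSim | utils/utils.py | get_doctor_queue
-- ===== SOURCE A (Python) =====
-- def get_doctor_queue(walk_in_times, walk_in_served_times, revisit_times, revisit_served_times):
--     max_time = max(walk_in_times+walk_in_served_times+revisit_times+revisit_served_times)
--     walk_in_all_times = walk_in_times + walk_in_served_times
--     revisit_all_times = revisit_times + revisit_served_times
--     y = [0]
--     a = sorted(list(set(walk_in_all_times)))
--     for time in a:
--         if time in walk_in_times and time in walk_in_served_times:
--             y.append(y[-1])
--         elif time in walk_in_times:
--             y.append(y[-1]+1)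
--         elif time in walk_in_served_times:
--             y.append(y[-1]-1)
--     y.append(y[-1])
--     xy = [0]+a+[max_time]
--
--     z = [0]
--     aa = sorted(list(set(revisit_all_times)))
--     for time in aa:
--         if time in revisit_times and time in revisit_served_times:
--             incre = len([t for t in revisit_times if t == time]) - len([t for t in revisit_served_times if t == time])
--             z.append(z[-1]+incre)
--         elif time in revisit_times:
--             z.append(z[-1]+1)
--         elif time in revisit_served_times:
--             z.append(z[-1]-1)
--     z.append(z[-1])
--     xz = [0]+aa+[max_time]
--     return xy,y,xz,z
-- ===== SOURCE B (Python) =====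
-- def get_doctor_queue(walk_in_times, walk_in_served_times, revisit_times, revisit_served_times):
--     max_time = max(walk_in_times + walk_in_served_times + revisit_times + revisit_served_times)
--
--     def counts(lst):
--         c = {}
--         for t in lst:
--             c[t] = c.get(t, 0) + 1
--         return c
--
--     def merge(arr, dep, both):
--         # two-pointer merge of two strictly increasing lists into (time, delta) events
--         i, j, ev = 0, 0, []
--         while i < len(arr) and j < len(dep):
--             if arr[i] < dep[j]:
--                 ev.append((arr[i], 1)); i += 1
--             elif dep[j] < arr[i]:
--                 ev.append((dep[j], -1)); j += 1
--             else:
--                 ev.append((arr[i], both(arr[i]))); i += 1; j += 1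
--         ev += [(t, 1) for t in arr[i:]]
--         ev += [(t, -1) for t in dep[j:]]
--         return ev
--
--     def curve(arrivals, departures, both):
--         ev = merge(sorted(set(arrivals)), sorted(set(departures)), both)
--         xs, ys, s = [0], [0], 0
--         for t, d in ev:
--             xs.append(t)
--             s += d
--             ys.append(s)
--         xs.append(max_time)
--         ys.append(s)
--         return xs, ys
--
--     xy, y = curve(walk_in_times, walk_in_served_times, lambda t: 0)
--     ci, co = counts(revisit_times), counts(revisit_served_times)
--     xz, z = curve(revisit_times, revisit_served_times, lambda t: ci[t] - co[t])
--     return xy, y, xz, z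
-- ===== Notes on version B (the rewrite author's own statement) =====
-- stated objective: faster
-- what changed: B never forms or scans the union: it sorts the deduplicated arrival and departure lists separately and does a two-pointer merge emitting (time, delta) events, replacing A's per-time linear membership scans and counting comprehensions over the union with a single merge plus a prefix-sum pass.
import Mathlib
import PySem

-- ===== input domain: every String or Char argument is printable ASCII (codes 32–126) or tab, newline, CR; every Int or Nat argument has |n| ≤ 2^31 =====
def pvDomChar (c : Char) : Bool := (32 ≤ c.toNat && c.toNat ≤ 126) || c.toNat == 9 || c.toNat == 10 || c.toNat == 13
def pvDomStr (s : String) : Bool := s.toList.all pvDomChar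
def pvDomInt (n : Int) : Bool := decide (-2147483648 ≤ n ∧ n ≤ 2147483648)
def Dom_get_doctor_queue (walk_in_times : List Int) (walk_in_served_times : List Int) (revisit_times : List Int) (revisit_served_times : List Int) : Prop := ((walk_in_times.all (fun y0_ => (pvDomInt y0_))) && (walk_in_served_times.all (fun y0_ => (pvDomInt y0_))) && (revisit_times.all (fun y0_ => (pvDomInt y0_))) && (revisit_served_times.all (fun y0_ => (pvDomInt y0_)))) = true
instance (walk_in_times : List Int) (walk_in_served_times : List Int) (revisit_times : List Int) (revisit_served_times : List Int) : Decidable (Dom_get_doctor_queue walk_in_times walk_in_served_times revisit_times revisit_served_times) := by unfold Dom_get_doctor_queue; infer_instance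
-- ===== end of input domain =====

-- B replaces A's membership-scan sweep over the sorted union with a two-pointer merge of the
-- two sorted deduplicated lists into (time, delta) events and a prefix-sum pass (objective: faster).


-- ===== PORT A =====
-- one iteration of A's walk-in loop: membership tests on the raw lists, append y[-1]±1
def pvAWalkStep (walk_in_times walk_in_served_times : List Int) (y : List Int) (time : Int) : List Int :=
  if walk_in_times.contains time && walk_in_served_times.contains time then
    y ++ [(PySem.List.pyGet? y (-1)).getD 0]
  else if walk_in_times.contains time then
    y ++ [(PySem.List.pyGet? y (-1)).getD 0 + 1]
  else if walk_in_served_times.contains time then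
    y ++ [(PySem.List.pyGet? y (-1)).getD 0 - 1]
  else y

-- one iteration of A's revisit loop: in the both-present branch A recounts occurrences with comprehensions
def pvARevStep (revisit_times revisit_served_times : List Int) (z : List Int) (time : Int) : List Int :=
  if revisit_times.contains time && revisit_served_times.contains time then
    let incre : Int := ((revisit_times.filter (fun t => t == time)).length : Int)
                       - ((revisit_served_times.filter (fun t => t == time)).length : Int)
    z ++ [(PySem.List.pyGet? z (-1)).getD 0 + incre]
  else if revisit_times.contains time then
    z ++ [(PySem.List.pyGet? z (-1)).getD 0 + 1]
  else if revisit_served_times.contains time then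
    z ++ [(PySem.List.pyGet? z (-1)).getD 0 - 1]
  else z

def get_doctor_queue (walk_in_times : List Int) (walk_in_served_times : List Int) (revisit_times : List Int) (revisit_served_times : List Int) : List Int × List Int × List Int × List Int :=
  -- max(...) raises ValueError on the empty concatenation; Pre_ excludes that, .getD 0 is never read
  let max_time := (PySem.List.max? (walk_in_times ++ walk_in_served_times ++ revisit_times ++ revisit_served_times) (fun x => x)).getD 0
  let walk_in_all_times := walk_in_times ++ walk_in_served_times
  let revisit_all_times := revisit_times ++ revisit_served_times
  let a := PySem.List.sorted (PySem.Set.ofList walk_in_all_times) (fun x => x) false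
  let y := a.foldl (pvAWalkStep walk_in_times walk_in_served_times) [0]
  let y := y ++ [(PySem.List.pyGet? y (-1)).getD 0]
  let xy := [0] ++ a ++ [max_time]
  let aa := PySem.List.sorted (PySem.Set.ofList revisit_all_times) (fun x => x) false
  let z := aa.foldl (pvARevStep revisit_times revisit_served_times) [0]
  let z := z ++ [(PySem.List.pyGet? z (-1)).getD 0]
  let xz := [0] ++ aa ++ [max_time]
  (xy, y, xz, z)

-- ===== PORT B =====
-- Source B's counts: a dict built in one pass (c[t] = c.get(t, 0) + 1)
def pvCounts (lst : List Int) : PySem.Dict Int Int :=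
  lst.foldl (fun c t => c.insert t (c.getD t 0 + 1)) PySem.Dict.empty

-- Source B's merge: two-pointer merge of two strictly increasing lists into (time, delta) events;
-- the two trailing '+=' extensions of Source B are the base cases of the recursion
def pvMerge (both : Int → Int) : List Int → List Int → List (Int × Int)
  | [], dep => dep.map (fun t => (t, -1))
  | a :: arr, [] => (a :: arr).map (fun t => (t, 1))
  | a :: arr, d :: dep =>
    if a < d then (a, 1) :: pvMerge both arr (d :: dep)
    else if d < a then (d, -1) :: pvMerge both (a :: arr) dep
    else (a, both a) :: pvMerge both arr dep

-- one iteration of Source B's accumulation loop over the events: append t to xs, s += d, append s to ys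
def pvBStep (p : List Int × List Int × Int) (td : Int × Int) : List Int × List Int × Int :=
  (p.1 ++ [td.1], p.2.1 ++ [p.2.2 + td.2], p.2.2 + td.2)

-- Source B's curve
def pvCurve (arrivals departures : List Int) (both : Int → Int) (max_time : Int) : List Int × List Int :=
  let ev := pvMerge both (PySem.List.sorted (PySem.Set.ofList arrivals) (fun x => x) false)
                         (PySem.List.sorted (PySem.Set.ofList departures) (fun x => x) false)
  let r := ev.foldl pvBStep ([0], [0], 0)
  (r.1 ++ [max_time], r.2.1 ++ [r.2.2])

def get_doctor_queue_alt (walk_in_times : List Int) (walk_in_served_times : List Int) (revisit_times : List Int) (revisit_served_times : List Int) : List Int × List Int × List Int × List Int :=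
  let max_time := (PySem.List.max? (walk_in_times ++ walk_in_served_times ++ revisit_times ++ revisit_served_times) (fun x => x)).getD 0
  let wy := pvCurve walk_in_times walk_in_served_times (fun _ => 0) max_time
  let ci := pvCounts revisit_times
  let co := pvCounts revisit_served_times
  -- ci[t] / co[t]: the key is present whenever the lambda is called (t in both lists), so getD 0 is exact
  let rz := pvCurve revisit_times revisit_served_times (fun t => ci.getD t 0 - co.getD t 0) max_time
  (wy.1, wy.2, rz.1, rz.2)

-- ===== PRECONDITION & SPEC =====
-- Pre_ excludes only the input where all four lists are empty: there Python's max([]) raises ValueError.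
def Pre_get_doctor_queue (walk_in_times : List Int) (walk_in_served_times : List Int) (revisit_times : List Int) (revisit_served_times : List Int) : Prop :=
  walk_in_times ++ walk_in_served_times ++ revisit_times ++ revisit_served_times ≠ []
instance (walk_in_times : List Int) (walk_in_served_times : List Int) (revisit_times : List Int) (revisit_served_times : List Int) : Decidable (Pre_get_doctor_queue walk_in_times walk_in_served_times revisit_times revisit_served_times) := by unfold Pre_get_doctor_queue; infer_instance

def pvWitness_get_doctor_queue : List Int × List Int × List Int × List Int := ([1, 3], [4], [2, 2], [5])

def Spec_get_doctor_queue (walk_in_times : List Int) (walk_in_served_times : List Int) (revisit_times : List Int) (revisit_served_times : List Int) (out : List Int × List Int × List Int × List Int) : Prop := out = get_doctor_queue_alt walk_in_times walk_in_served_times revisit_times revisit_served_times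
instance (walk_in_times : List Int) (walk_in_served_times : List Int) (revisit_times : List Int) (revisit_served_times : List Int) (out : List Int × List Int × List Int × List Int) : Decidable (Spec_get_doctor_queue walk_in_times walk_in_served_times revisit_times revisit_served_times out) := by unfold Spec_get_doctor_queue; infer_instance

-- ===== CLAIM (what is proved, stated in full; the proofs are below) =====
def Claim_equal_get_doctor_queue : Prop := ∀ (walk_in_times : List Int) (walk_in_served_times : List Int) (revisit_times : List Int) (revisit_served_times : List Int), Dom_get_doctor_queue walk_in_times walk_in_served_times revisit_times revisit_served_times → Pre_get_doctor_queue walk_in_times walk_in_served_times revisit_times revisit_served_times → Spec_get_doctor_queue walk_in_times walk_in_served_times revisit_times revisit_served_times (get_doctor_queue walk_in_times walk_in_served_times revisit_times revisit_served_times)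

-- ===== LEMMAS AND PROOFS =====

-- y[-1] of a nonempty list is its last element
theorem pvLastGet (ys : List Int) (c : Int) (h : ys.getLast? = some c) :
    (PySem.List.pyGet? ys (-1)).getD 0 = c := by
  have hne : ys ≠ [] := by intro h'; subst h'; simp at h
  have hlen : 0 < ys.length := List.length_pos_iff.mpr hne
  rw [List.getLast?_eq_getElem?] at h
  unfold PySem.List.pyGet? PySem.List.pyIdx?
  split_ifs <;> first
    | omega
    | (simp only [Option.bind_some, show (- -1:Int).toNat = 1 by norm_num]; simp [h])

-- Source B's hand-written counting dict is Counter(lst)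
theorem pvCounts_getD (lst : List Int) (t : Int) :
    (pvCounts lst).getD t 0 = lst.count t := by
  rw [show pvCounts lst = PySem.Dict.counter lst from
    PySem.Dict.foldl_insert_getD_add_one_eq_counter lst]
  exact PySem.Dict.getD_counter lst t

-- the times emitted by the merge are exactly the elements of the two input lists
theorem pvMerge_fst_mem (both : Int → Int) (arr dep : List Int) (t : Int) :
    t ∈ (pvMerge both arr dep).map Prod.fst ↔ t ∈ arr ∨ t ∈ dep := by
  induction arr, dep using pvMerge.induct with
  | case1 dep => simp [pvMerge]
  | case2 a arr => simp [pvMerge]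
  | case3 a arr d dep h ih =>
    simp only [pvMerge, if_pos h, List.map_cons, List.mem_cons, ih, List.mem_cons]
    tauto
  | case4 a arr d dep h1 h2 ih =>
    simp only [pvMerge, if_neg h1, if_pos h2, List.map_cons, List.mem_cons, ih, List.mem_cons]
    tauto
  | case5 a arr d dep h1 h2 ih =>
    have hda : d = a := by omega
    subst hda
    simp only [pvMerge, if_neg h1, List.map_cons, List.mem_cons, ih]
    tauto

-- the merged times are strictly increasing when both inputs are
theorem pvMerge_fst_pairwise (both : Int → Int) (arr dep : List Int)
    (ha : arr.Pairwise (· < ·)) (hd : dep.Pairwise (· < ·)) :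
    ((pvMerge both arr dep).map Prod.fst).Pairwise (· < ·) := by
  induction arr, dep using pvMerge.induct with
  | case1 dep => simpa [pvMerge, List.pairwise_map] using hd
  | case2 a arr => simpa [pvMerge, List.pairwise_map] using ha
  | case3 a arr d dep h ih =>
    rw [List.pairwise_cons] at ha
    simp only [pvMerge, if_pos h, List.map_cons, List.pairwise_cons]
    refine ⟨?_, ih ha.2 hd⟩
    intro t ht
    rcases (pvMerge_fst_mem both arr (d :: dep) t).mp ht with hm | hm
    · exact ha.1 t hm
    · rcases List.mem_cons.mp hm with rfl | hm
      · exact h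
      · exact lt_trans h ((List.pairwise_cons.mp hd).1 t hm)
  | case4 a arr d dep h1 h2 ih =>
    rw [List.pairwise_cons] at hd
    simp only [pvMerge, if_neg h1, if_pos h2, List.map_cons, List.pairwise_cons]
    refine ⟨?_, ih ha hd.2⟩
    intro t ht
    rcases (pvMerge_fst_mem both (a :: arr) dep t).mp ht with hm | hm
    · rcases List.mem_cons.mp hm with rfl | hm
      · exact h2
      · exact lt_trans h2 ((List.pairwise_cons.mp ha).1 t hm)
    · exact hd.1 t hm
  | case5 a arr d dep h1 h2 ih =>
    have hda : d = a := by omega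
    subst hda
    rw [List.pairwise_cons] at ha hd
    simp only [pvMerge, if_neg h1, List.map_cons, List.pairwise_cons]
    refine ⟨?_, ih ha.2 hd.2⟩
    intro t ht
    rcases (pvMerge_fst_mem both arr dep t).mp ht with hm | hm
    · exact ha.1 t hm
    · exact hd.1 t hm

-- each emitted delta is A's branch value: 'both' when the time is in both lists, else ±1
theorem pvMerge_snd (both : Int → Int) (arr dep : List Int)
    (ha : arr.Pairwise (· < ·)) (hd : dep.Pairwise (· < ·)) :
    ∀ p ∈ pvMerge both arr dep,
      p.2 = if p.1 ∈ arr ∧ p.1 ∈ dep then both p.1 else if p.1 ∈ arr then (1 : Int) else -1 := by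
  induction arr, dep using pvMerge.induct with
  | case1 dep =>
    intro p hp
    simp only [pvMerge, List.mem_map] at hp
    obtain ⟨t, ht, rfl⟩ := hp
    simp [ht]
  | case2 a arr =>
    intro p hp
    simp only [pvMerge, List.mem_map] at hp
    obtain ⟨t, ht, rfl⟩ := hp
    simp [ht]
  | case3 a arr d dep h ih =>
    rw [List.pairwise_cons] at ha
    intro p hp
    simp only [pvMerge, if_pos h, List.mem_cons] at hp
    rcases hp with rfl | hp
    · have hnd : (a : Int) ∉ d :: dep := by
        intro hm
        rcases List.mem_cons.mp hm with rfl | hm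
        · omega
        · exact absurd ((List.pairwise_cons.mp hd).1 a hm) (by omega)
      simp [hnd]
    · -- p comes from the recursive call; its time is > a, so membership in a::arr drops the head
      have hgt : a < p.1 := by
        have hm : p.1 ∈ (pvMerge both arr (d :: dep)).map Prod.fst :=
          List.mem_map.mpr ⟨p, hp, rfl⟩
        rcases (pvMerge_fst_mem both arr (d :: dep) p.1).mp hm with hm' | hm'
        · exact ha.1 p.1 hm'
        · rcases List.mem_cons.mp hm' with heq | hm''
          · omega
          · exact lt_trans h ((List.pairwise_cons.mp hd).1 p.1 hm'')
      have hne : p.1 ≠ a := by omega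
      rw [ih ha.2 hd p hp]
      simp [List.mem_cons, hne]
  | case4 a arr d dep h1 h2 ih =>
    rw [List.pairwise_cons] at hd
    intro p hp
    simp only [pvMerge, if_neg h1, if_pos h2, List.mem_cons] at hp
    rcases hp with rfl | hp
    · have hna : (d : Int) ∉ a :: arr := by
        intro hm
        rcases List.mem_cons.mp hm with rfl | hm
        · omega
        · exact absurd ((List.pairwise_cons.mp ha).1 d hm) (by omega)
      simp [hna]
    · have hgt : d < p.1 := by
        have hm : p.1 ∈ (pvMerge both (a :: arr) dep).map Prod.fst :=
          List.mem_map.mpr ⟨p, hp, rfl⟩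
        rcases (pvMerge_fst_mem both (a :: arr) dep p.1).mp hm with hm' | hm'
        · rcases List.mem_cons.mp hm' with heq | hm''
          · omega
          · exact lt_trans h2 ((List.pairwise_cons.mp ha).1 p.1 hm'')
        · exact hd.1 p.1 hm'
      have hne : p.1 ≠ d := by omega
      rw [ih ha hd.2 p hp]
      simp [List.mem_cons, hne]
  | case5 a arr d dep h1 h2 ih =>
    have hda : d = a := by omega
    subst hda
    rw [List.pairwise_cons] at ha hd
    intro p hp
    simp only [pvMerge, if_neg h1, List.mem_cons] at hp
    rcases hp with rfl | hp
    · simp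
    · have hgt : d < p.1 := by
        have hm : p.1 ∈ (pvMerge both arr dep).map Prod.fst :=
          List.mem_map.mpr ⟨p, hp, rfl⟩
        rcases (pvMerge_fst_mem both arr dep p.1).mp hm with hm' | hm'
        · exact ha.1 p.1 hm'
        · exact hd.1 p.1 hm'
      have hne : p.1 ≠ d := by omega
      rw [ih ha.2 hd.2 p hp]
      simp [List.mem_cons, hne]

-- the merged times of the two sorted deduplicated lists ARE sorted(set(l1 ++ l2))
theorem pvMerge_fst_eq_sorted (both : Int → Int) (l1 l2 : List Int) :
    PySem.List.sorted (PySem.Set.ofList (l1 ++ l2)) (fun x => x) false =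
      (pvMerge both (PySem.List.sorted (PySem.Set.ofList l1) (fun x => x) false)
                    (PySem.List.sorted (PySem.Set.ofList l2) (fun x => x) false)).map Prod.fst := by
  set s1 := PySem.List.sorted (PySem.Set.ofList l1) (fun x => x) false with hs1
  set s2 := PySem.List.sorted (PySem.Set.ofList l2) (fun x => x) false with hs2
  have hp1 : s1.Pairwise (· < ·) := PySem.List.sorted_ofList_pairwise_lt l1
  have hp2 : s2.Pairwise (· < ·) := PySem.List.sorted_ofList_pairwise_lt l2
  have hpw : ((pvMerge both s1 s2).map Prod.fst).Pairwise (· < ·) :=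
    pvMerge_fst_pairwise both s1 s2 hp1 hp2
  have hperm : ((pvMerge both s1 s2).map Prod.fst).Perm (PySem.Set.ofList (l1 ++ l2)) := by
    refine (List.perm_ext_iff_of_nodup (hpw.imp ne_of_lt) (PySem.Set.nodup_ofList _)).mpr ?_
    intro t
    rw [pvMerge_fst_mem both s1 s2 t, PySem.Set.mem_ofList, List.mem_append, hs1, hs2,
      PySem.List.mem_sorted, PySem.List.mem_sorted, PySem.Set.mem_ofList, PySem.Set.mem_ofList]
  exact PySem.List.sorted_eq_of_perm_of_pairwise_lt _ _ _ hperm hpw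

-- folding Source B's event loop = appending the times to xs and folding A's step over ys,
-- with the accumulator s tracking the last ys entry
theorem pvFoldB (stepA : List Int → Int → List Int) (ev : List (Int × Int))
    (h : ∀ p ∈ ev, ∀ (y : List Int) (c : Int), y.getLast? = some c → stepA y p.1 = y ++ [c + p.2]) :
    ∀ (xs ys : List Int) (s : Int), ys.getLast? = some s →
      (ev.foldl pvBStep (xs, ys, s)).1 = xs ++ ev.map Prod.fst ∧
      (ev.foldl pvBStep (xs, ys, s)).2.1 = (ev.map Prod.fst).foldl stepA ys ∧
      (ev.foldl pvBStep (xs, ys, s)).2.1.getLast? = some (ev.foldl pvBStep (xs, ys, s)).2.2 := by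
  induction ev with
  | nil => intro xs ys s hl; simpa using hl
  | cons p ev ih =>
    intro xs ys s hl
    have hstep : stepA ys p.1 = ys ++ [s + p.2] := h p List.mem_cons_self ys s hl
    have hl' : (ys ++ [s + p.2]).getLast? = some (s + p.2) := by simp
    have ihh := ih (fun q hq => h q (List.mem_cons_of_mem p hq)) (xs ++ [p.1]) (ys ++ [s + p.2])
      (s + p.2) hl'
    simp only [List.foldl_cons, pvBStep, List.map_cons]
    refine ⟨?_, ?_, ihh.2.2⟩
    · rw [ihh.1, List.append_assoc]; rfl
    · rw [ihh.2.1, hstep]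

-- A's walk-in step is 'append last + delta' for the walk-in deltas (both present → 0)
theorem pvWalkStepDelta (wt ws : List Int) (t : Int) (hm : t ∈ wt ∨ t ∈ ws)
    (d : Int) (hd : d = if t ∈ wt ∧ t ∈ ws then (0 : Int) else if t ∈ wt then 1 else -1)
    (y : List Int) (c : Int) (hl : y.getLast? = some c) :
    pvAWalkStep wt ws y t = y ++ [c + d] := by
  unfold pvAWalkStep
  rw [pvLastGet y c hl]
  by_cases h1 : t ∈ wt <;> by_cases h2 : t ∈ ws <;>
    simp [h1, h2, hd, sub_eq_add_neg] at hm ⊢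

-- A's revisit step is 'append last + delta' for the revisit deltas (both present → count difference)
theorem pvRevStepDelta (rt rs : List Int) (t : Int) (hm : t ∈ rt ∨ t ∈ rs)
    (d : Int) (hd : d = if t ∈ rt ∧ t ∈ rs then ((rt.count t : Int) - (rs.count t : Int))
                        else if t ∈ rt then 1 else -1)
    (z : List Int) (c : Int) (hl : z.getLast? = some c) :
    pvARevStep rt rs z t = z ++ [c + d] := by
  unfold pvARevStep
  rw [pvLastGet z c hl]
  by_cases h1 : t ∈ rt <;> by_cases h2 : t ∈ rs <;>
    simp [h1, h2, hd, sub_eq_add_neg,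
      ← List.count_eq_length_filter] at hm ⊢

-- one half of the result: A's loop + trailing duplicate = Source B's curve, given that A's step
-- realises the merge deltas
theorem pvHalf (stepA : List Int → Int → List Int) (l1 l2 : List Int) (both : Int → Int) (mt : Int)
    (hstep : ∀ t, (t ∈ l1 ∨ t ∈ l2) → ∀ (d : Int),
      d = (if t ∈ l1 ∧ t ∈ l2 then both t else if t ∈ l1 then 1 else -1) →
      ∀ (y : List Int) (c : Int), y.getLast? = some c → stepA y t = y ++ [c + d]) :
    (let a := PySem.List.sorted (PySem.Set.ofList (l1 ++ l2)) (fun x => x) false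
     let y := a.foldl stepA [0]
     ([0] ++ a ++ [mt], y ++ [(PySem.List.pyGet? y (-1)).getD 0])) = pvCurve l1 l2 both mt := by
  set s1 := PySem.List.sorted (PySem.Set.ofList l1) (fun x => x) false with hs1
  set s2 := PySem.List.sorted (PySem.Set.ofList l2) (fun x => x) false with hs2
  have hp1 : s1.Pairwise (· < ·) := PySem.List.sorted_ofList_pairwise_lt l1
  have hp2 : s2.Pairwise (· < ·) := PySem.List.sorted_ofList_pairwise_lt l2
  have hmem1 : ∀ t, t ∈ s1 ↔ t ∈ l1 := by
    intro t; rw [hs1, PySem.List.mem_sorted, PySem.Set.mem_ofList]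
  have hmem2 : ∀ t, t ∈ s2 ↔ t ∈ l2 := by
    intro t; rw [hs2, PySem.List.mem_sorted, PySem.Set.mem_ofList]
  have hev : ∀ p ∈ pvMerge both s1 s2, ∀ (y : List Int) (c : Int),
      y.getLast? = some c → stepA y p.1 = y ++ [c + p.2] := by
    intro p hp y c hl
    have hm : p.1 ∈ (pvMerge both s1 s2).map Prod.fst := List.mem_map.mpr ⟨p, hp, rfl⟩
    have hm' := (pvMerge_fst_mem both s1 s2 p.1).mp hm
    have hd := pvMerge_snd both s1 s2 hp1 hp2 p hp
    rw [hmem1, hmem2] at hm'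
    refine hstep p.1 hm' p.2 ?_ y c hl
    rw [hd]
    simp only [hmem1, hmem2]
  obtain ⟨h1f, h2f, h3f⟩ := pvFoldB stepA (pvMerge both s1 s2) hev [0] [0] 0 (by simp)
  have hsorted := pvMerge_fst_eq_sorted both l1 l2
  rw [← hs1, ← hs2] at hsorted
  rw [h2f] at h3f
  simp only [pvCurve, ← hs1, ← hs2]
  rw [hsorted, h1f, h2f, pvLastGet _ _ h3f]

-- ===== VERDICT (by name: the statement is the Claim_ definition above) =====
theorem get_doctor_queue_spec : Claim_equal_get_doctor_queue := by
  intro wt ws rt rs _ _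
  unfold Spec_get_doctor_queue get_doctor_queue get_doctor_queue_alt
  have hw := pvHalf (pvAWalkStep wt ws) wt ws (fun _ => 0)
    ((PySem.List.max? (wt ++ ws ++ rt ++ rs) (fun x => x)).getD 0)
    (fun t hm d hd y c hl => pvWalkStepDelta wt ws t hm d hd y c hl)
  have hr := pvHalf (pvARevStep rt rs) rt rs
    (fun t => (pvCounts rt).getD t 0 - (pvCounts rs).getD t 0)
    ((PySem.List.max? (wt ++ ws ++ rt ++ rs) (fun x => x)).getD 0)
    (fun t hm d hd y c hl => pvRevStepDelta rt rs t hm d (by simpa [pvCounts_getD] using hd) y c hl)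
  dsimp only at hw hr ⊢
  rw [← hw, ← hr]
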